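-- pv_equiv track=rewrite | github.com/thatMissingSock/dataStructureAndAlgorithmsRevision | week 2/rowCycleI.py | row_cycle
-- ===== SOURCE A (Python) =====
-- def row_cycle(M, r):
--     """
--     The aim of this is to take in a matrix (M) and return a new matrix but with each value 'cycled' r amount of times.
--     If r was 3 then everything moves down 3 rows and if r was -3 then everything moves up 3 rows.
--     :param M: A matrix.
--     :param r: A value representing how many times it should be cycled.
--     :return: A new CYCLED matrix.
--     """
--     tempMatrix = [None] * len(M)
--     max = len(M) - 1
--     for row in range(len(M)):
--         newPlacement = r + row
--         newPlacement %= (max + 1)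
--         tempMatrix[newPlacement] = M[row]
--
--     return tempMatrix
-- ===== SOURCE B (Python) =====
-- def row_cycle(M, r):
--     if not M:
--         return []
--     s = (-r) % len(M)
--     return M[s:] + M[:s]
-- ===== Notes on version B (the rewrite author's own statement) =====
-- stated objective: idiomatic
-- what changed: Replaces the per-row modular-index placement into a preallocated list by a single slice split M[s:] + M[:s] with s = (-r) % len(M), guarding the empty matrix.
import Mathlib
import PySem

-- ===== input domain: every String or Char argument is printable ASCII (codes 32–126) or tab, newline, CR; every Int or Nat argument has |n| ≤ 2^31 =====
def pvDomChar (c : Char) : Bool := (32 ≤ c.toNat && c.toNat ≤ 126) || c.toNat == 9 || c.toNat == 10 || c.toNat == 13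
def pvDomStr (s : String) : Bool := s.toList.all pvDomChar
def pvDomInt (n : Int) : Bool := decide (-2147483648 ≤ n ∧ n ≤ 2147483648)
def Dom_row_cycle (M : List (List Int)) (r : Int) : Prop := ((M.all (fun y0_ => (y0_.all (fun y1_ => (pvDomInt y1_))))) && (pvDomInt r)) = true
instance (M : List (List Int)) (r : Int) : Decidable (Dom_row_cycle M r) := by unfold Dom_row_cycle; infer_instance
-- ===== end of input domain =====

-- B rebuilds the rotated matrix by one slice split (M[s:] + M[:s]) instead of A's
-- per-row modular-index placement into a preallocated list; same O(n) cost, more idiomatic.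

-- ===== PORT A =====
-- tempMatrix = [None] * len(M): modelled as replicate with [] — every slot is
-- overwritten exactly once by the loop (the placement map is a bijection), so the
-- placeholder never survives and the returned value matches Python's.
def row_cycle (M : List (List Int)) (r : Int) : List (List Int) :=
  let n := M.length
  let maxv : Int := (n : Int) - 1
  (List.range n).foldl
    (fun tmp (row : Nat) =>
      tmp.set (PySem.Int.mod (r + (row : Int)) (maxv + 1)).toNat (M.getD row []))
    (List.replicate n [])

-- ===== PORT B =====
def row_cycle_alt (M : List (List Int)) (r : Int) : List (List Int) :=
  if M = [] then []
  else
    let s := PySem.Int.mod (-r) (M.length : Int)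
    PySem.List.slice M (some s) none ++ PySem.List.slice M none (some s)

-- ===== PRECONDITION & SPEC =====
def Spec_row_cycle (M : List (List Int)) (r : Int) (out : List (List Int)) : Prop := out = row_cycle_alt M r
instance (M : List (List Int)) (r : Int) (out : List (List Int)) : Decidable (Spec_row_cycle M r out) := by unfold Spec_row_cycle; infer_instance

-- ===== CLAIM (what is proved, stated in full; the proofs are below) =====
def Claim_equal_row_cycle : Prop := ∀ (M : List (List Int)) (r : Int), Dom_row_cycle M r → Spec_row_cycle M r (row_cycle M r)

-- ===== LEMMAS AND PROOFS =====

theorem pv_key (r : Int) (n k j : Nat) (hn : 0 < n) (hk : k < n) (hj : j < n) :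
    (((r + (k : Int)) % (n : Int)).toNat = j) ↔ ((((j : Int) - r) % (n : Int)).toNat = k) := by
  have hnz : (0:Int) < (n:Int) := by exact_mod_cast hn
  have h1 : 0 ≤ (r + (k : Int)) % (n : Int) := Int.emod_nonneg _ hnz.ne'
  have h2 : 0 ≤ ((j : Int) - r) % (n : Int) := Int.emod_nonneg _ hnz.ne'
  constructor
  · intro h
    have ha : (r + (k : Int)) % (n : Int) = (j : Int) := by omega
    have : ((j : Int) - r) % (n : Int) = (k : Int) := by
      calc ((j : Int) - r) % (n : Int) = ((r + (k:Int)) % (n:Int) - r) % (n:Int) := by rw [ha]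
        _ = ((r + (k:Int)) - r) % (n:Int) := by
              rw [Int.sub_emod, Int.emod_emod_of_dvd _ dvd_rfl, ← Int.sub_emod]
        _ = (k:Int) % (n:Int) := by ring_nf
        _ = (k:Int) := Int.emod_eq_of_lt (by positivity) (by exact_mod_cast hk)
    omega
  · intro h
    have hb : ((j : Int) - r) % (n : Int) = (k : Int) := by omega
    have : (r + (k : Int)) % (n : Int) = (j : Int) := by
      calc (r + (k:Int)) % (n:Int) = (r + ((j:Int) - r) % (n:Int)) % (n:Int) := by rw [hb]
        _ = (r + ((j:Int) - r)) % (n:Int) := by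
              rw [Int.add_emod, Int.emod_emod_of_dvd _ dvd_rfl, ← Int.add_emod]
        _ = (j:Int) % (n:Int) := by ring_nf
        _ = (j:Int) := Int.emod_eq_of_lt (by positivity) (by exact_mod_cast hj)
    omega

theorem pv_fold_length (f : Nat → Nat) (g : Nat → List Int) (l : List Nat) (acc : List (List Int)) :
    (l.foldl (fun t row => t.set (f row) (g row)) acc).length = acc.length := by
  induction l generalizing acc with
  | nil => rfl
  | cons x xs ih => simp [List.foldl_cons, ih, List.length_set]

theorem pv_fold_get (M : List (List Int)) (r : Int) (k j : Nat) (hk : k ≤ M.length) (hj : j < M.length) :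
    ((List.range k).foldl (fun t (row : Nat) => t.set (((r + (row:Int)) % (M.length:Int)).toNat) (M.getD row []))
        (List.replicate M.length ([]:List Int))).getD j [] =
      if ((((j:Int) - r) % (M.length:Int)).toNat) < k
      then M.getD ((((j:Int) - r) % (M.length:Int)).toNat) [] else [] := by
  have hn : 0 < M.length := lt_of_le_of_lt (Nat.zero_le j) hj
  induction k with
  | zero => simp [List.getD]
  | succ k ih =>
    have hk' : k ≤ M.length := Nat.le_of_succ_le hk
    rw [List.range_succ, List.foldl_append, List.foldl_cons, List.foldl_nil]
    set F := (List.range k).foldl (fun t (row : Nat) => t.set (((r + (row:Int)) % (M.length:Int)).toNat) (M.getD row []))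
        (List.replicate M.length ([]:List Int)) with hF
    by_cases hcase : ((r + (k:Int)) % (M.length:Int)).toNat = j
    · have hkey := (pv_key r M.length k j hn (Nat.lt_of_succ_le hk) hj).mp hcase
      rw [hcase]
      have hlenF : F.length = M.length := by rw [hF]; rw [pv_fold_length]; simp
      rw [List.getD_eq_getElem?_getD, List.getElem?_set_self (by rw [hlenF]; omega), hkey]
      simp [hkey, Nat.lt_succ_self]
    · have hne : ((((j:Int) - r) % (M.length:Int)).toNat) ≠ k := fun h =>
        hcase ((pv_key r M.length k j hn (Nat.lt_of_succ_le hk) hj).mpr h)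
      rw [List.getD_eq_getElem?_getD, List.getElem?_set_ne hcase, ← List.getD_eq_getElem?_getD, ih hk']
      have : ((((j:Int) - r) % (M.length:Int)).toNat) < k + 1 ↔ ((((j:Int) - r) % (M.length:Int)).toNat) < k := by omega
      rw [if_congr this rfl rfl]

theorem pv_shift (r : Int) (n j : Nat) (hn : 0 < n) (hj : j < n) :
    ((((j:Int) - r) % (n:Int)).toNat)
      = if j < n - (((-r) % (n:Int)).toNat) then (((-r) % (n:Int)).toNat) + j
        else j - (n - (((-r) % (n:Int)).toNat)) := by
  have hnz : (0:Int) < (n:Int) := by exact_mod_cast hn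
  have hs0 : 0 ≤ (-r) % (n:Int) := Int.emod_nonneg _ hnz.ne'
  have hs1 : (-r) % (n:Int) < (n:Int) := Int.emod_lt_of_pos _ hnz
  set s : Nat := (((-r) % (n:Int)).toNat) with hs
  have hsc : ((s:Int)) = (-r) % (n:Int) := by omega
  have hsn : s < n := by omega
  have hmod : ((j:Int) - r) % (n:Int) = ((j:Int) + (s:Int)) % (n:Int) := by
    rw [hsc, Int.add_emod, Int.emod_emod_of_dvd _ dvd_rfl, ← Int.add_emod]
    ring_nf
  rw [hmod]
  by_cases hlt : j < n - s
  · rw [if_pos hlt]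
    have : ((j:Int) + (s:Int)) % (n:Int) = ((j:Int) + (s:Int)) :=
      Int.emod_eq_of_lt (by positivity) (by push_cast; omega)
    omega
  · rw [if_neg hlt]
    have h2 : ((j:Int) + (s:Int)) % (n:Int) = ((j:Int) + (s:Int) - (n:Int)) % (n:Int) := by
      rw [Int.sub_emod_right]
    have h3 : ((j:Int) + (s:Int) - (n:Int)) % (n:Int) = ((j:Int) + (s:Int) - (n:Int)) :=
      Int.emod_eq_of_lt (by push_cast; omega) (by push_cast; omega)
    omega

theorem pv_main (M : List (List Int)) (r : Int) : row_cycle M r = row_cycle_alt M r := by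
  by_cases hM : M = []
  · subst hM; simp [row_cycle, row_cycle_alt]
  · have hn : 0 < M.length := List.length_pos_iff.mpr hM
    have hnz : (0:Int) < (M.length:Int) := by exact_mod_cast hn
    -- rewrite A's fold to use `%`
    have hA : row_cycle M r
        = (List.range M.length).foldl
            (fun t (row : Nat) => t.set (((r + (row:Int)) % (M.length:Int)).toNat) (M.getD row []))
            (List.replicate M.length []) := by
      unfold row_cycle
      have hfun : (fun (tmp : List (List Int)) (row : Nat) =>
            tmp.set (PySem.Int.mod (r + (row : Int)) (((M.length:Int) - 1) + 1)).toNat (M.getD row []))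
          = (fun t (row : Nat) => t.set (((r + (row:Int)) % (M.length:Int)).toNat) (M.getD row [])) := by
        funext t row
        rw [show ((M.length:Int) - 1) + 1 = (M.length:Int) by ring,
           PySem.Int.mod_eq_emod_of_pos hnz]
      simp only [hfun]
    -- rewrite B to drop/take
    have hs0 : 0 ≤ (-r) % (M.length:Int) := Int.emod_nonneg _ hnz.ne'
    have hs1 : (-r) % (M.length:Int) < (M.length:Int) := Int.emod_lt_of_pos _ hnz
    set s : Nat := (((-r) % (M.length:Int)).toNat) with hsdef
    have hsn : s < M.length := by omega
    have hB : row_cycle_alt M r = M.drop s ++ M.take s := by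
      unfold row_cycle_alt
      rw [if_neg hM]
      simp only [PySem.Int.mod_eq_emod_of_pos hnz]
      rw [PySem.List.slice_from M hs0, PySem.List.slice_to M hs0]
    rw [hA, hB]
    have hlenA : ((List.range M.length).foldl
            (fun t (row : Nat) => t.set (((r + (row:Int)) % (M.length:Int)).toNat) (M.getD row []))
            (List.replicate M.length ([]:List Int))).length = M.length := by
      rw [pv_fold_length]; simp
    apply List.ext_getElem
    · rw [hlenA]; simp; omega
    · intro j hj1 hj2
      rw [hlenA] at hj1
      have hφlt : ((((j:Int) - r) % (M.length:Int)).toNat) < M.length := by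
        have := Int.emod_lt_of_pos ((j:Int) - r) hnz
        have := Int.emod_nonneg ((j:Int) - r) hnz.ne'
        omega
      have hL : _ = _ := pv_fold_get M r M.length j (le_refl _) hj1
      rw [if_pos hφlt] at hL
      have hgetD : ((List.range M.length).foldl
            (fun t (row : Nat) => t.set (((r + (row:Int)) % (M.length:Int)).toNat) (M.getD row []))
            (List.replicate M.length ([]:List Int))).getD j []
          = ((List.range M.length).foldl
            (fun t (row : Nat) => t.set (((r + (row:Int)) % (M.length:Int)).toNat) (M.getD row []))
            (List.replicate M.length ([]:List Int)))[j] := by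
        rw [List.getD_eq_getElem?_getD, List.getElem?_eq_getElem (by rw [hlenA]; omega)]
        rfl
      rw [← hgetD, hL, List.getD_eq_getElem _ _ hφlt]
      -- RHS
      by_cases hlt : j < M.length - s
      · have hidx : ((((j:Int) - r) % (M.length:Int)).toNat) = s + j := by
          rw [pv_shift r M.length j hn hj1, if_pos hlt]
        rw [List.getElem_append_left (by simp; omega)]
        simp only [List.getElem_drop, hidx]
      · have hidx : ((((j:Int) - r) % (M.length:Int)).toNat) = j - (M.length - s) := by
          rw [pv_shift r M.length j hn hj1, if_neg hlt]
        rw [List.getElem_append_right (by simp; omega)]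
        simp only [List.getElem_take, hidx]
        congr 1
        simp

-- ===== VERDICT (by name: the statement is the Claim_ definition above) =====
theorem row_cycle_spec : Claim_equal_row_cycle := by
  intro M r _
  unfold Spec_row_cycle
  exact pv_main M r
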